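-- pv_equiv track=rewrite | github.com/umairrana007/ak-lasbela-analysis | generate_report.py | get_target
-- ===== SOURCE A (Python) =====
-- LINE1_SETS = [
--     {'t': {7, 1, 2}, 'tg': {0, 5, 9}},
--     {'t': {8, 1, 3}, 'tg': {0, 4, 6}},
--     {'t': {9, 1, 4}, 'tg': {0, 3, 5}},
--     {'t': {0, 1, 5}, 'tg': {2, 4, 7}},
--     {'t': {1, 2, 6}, 'tg': {3, 5, 8}},
--     {'t': {2, 3, 7}, 'tg': {4, 6, 9}},
--     {'t': {3, 4, 8}, 'tg': {5, 7, 0}},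
--     {'t': {4, 5, 9}, 'tg': {6, 8, 1}},
--     {'t': {5, 6, 0}, 'tg': {7, 9, 2}},
--     {'t': {6, 7, 1}, 'tg': {8, 0, 3}}
-- ]
--
-- def get_target(jodi_str):
--     jodi_str = str(jodi_str)
--     if not jodi_str.isdigit() or len(jodi_str) < 2: return None
--     d1, d2 = int(jodi_str[0]), int(jodi_str[1])
--     for s in LINE1_SETS:
--         if d1 in s['t'] and d2 in s['t']: return s['tg']
--         if d1 in s['tg'] and d2 in s['tg']: return s['t']
--     return None
-- ===== SOURCE B (Python) =====
-- # rows as (t, tg) tuples; the published LINE1_SETS shape is rebuilt only in the result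
-- _ROWS = [((7, 1, 2), (0, 5, 9)), ((8, 1, 3), (0, 4, 6)), ((9, 1, 4), (0, 3, 5)),
--          ((0, 1, 5), (2, 4, 7)), ((1, 2, 6), (3, 5, 8)), ((2, 3, 7), (4, 6, 9)),
--          ((3, 4, 8), (5, 7, 0)), ((4, 5, 9), (6, 8, 1)), ((5, 6, 0), (7, 9, 2)),
--          ((6, 7, 1), (8, 0, 3))]
--
-- # inverted indexes, built once: digit -> set of row indices whose t / tg side contains it
-- _T_IDX = {d: {i for i, (t, _) in enumerate(_ROWS) if d in t} for d in range(10)}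
-- _TG_IDX = {d: {i for i, (_, g) in enumerate(_ROWS) if d in g} for d in range(10)}
--
-- def _pick(d1, d2):
--     t_hits = _T_IDX[d1] & _T_IDX[d2]
--     tg_hits = _TG_IDX[d1] & _TG_IDX[d2]
--     best = None
--     if t_hits:
--         best = (min(t_hits), 1)   # a t-match yields the row's tg side
--     if tg_hits:
--         j = min(tg_hits)
--         if best is None or j < best[0]:
--             best = (j, 0)         # a tg-match yields the row's t side
--     if best is None:
--         return None
--     i, side = best
--     return set(_ROWS[i][side])
--
-- def get_target(jodi_str):
--     jodi_str = str(jodi_str)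
--     if not jodi_str.isdigit() or len(jodi_str) < 2:
--         return None
--     return _pick(int(jodi_str[0]), int(jodi_str[1]))
-- ===== Notes on version B (the rewrite author's own statement) =====
-- stated objective: alternative
-- what changed: Replaces A's per-call linear scan of the ten rows (first row whose 't' or 'tg' contains both digits) by two digit->row-index inverted indexes precomputed once at module scope; get_target intersects the index sets for the two digits and picks the minimum matching row index, with a t-match beating a tg-match of the same rank.
import Mathlib
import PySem

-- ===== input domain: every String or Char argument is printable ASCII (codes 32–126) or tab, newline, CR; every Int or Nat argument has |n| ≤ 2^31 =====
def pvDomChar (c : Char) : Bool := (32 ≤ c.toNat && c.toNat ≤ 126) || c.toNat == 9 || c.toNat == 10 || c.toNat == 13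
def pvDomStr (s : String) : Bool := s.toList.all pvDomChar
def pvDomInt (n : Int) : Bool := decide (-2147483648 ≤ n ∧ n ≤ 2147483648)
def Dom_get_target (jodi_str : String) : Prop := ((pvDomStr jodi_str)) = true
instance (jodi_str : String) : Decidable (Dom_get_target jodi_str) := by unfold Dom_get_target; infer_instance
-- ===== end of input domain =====

-- B replaces A's linear scan over the ten rows by two precomputed digit->row-index
-- inverted indexes intersected per digit pair (objective: alternative data structure).

-- ===== PORT A =====
-- the module constant LINE1_SETS: each dict {'t': …, 'tg': …} as a pair (t, tg) of sets
def LINE1_SETS : List (PySem.Set Int × PySem.Set Int) :=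
  [([7, 1, 2], [0, 5, 9]), ([8, 1, 3], [0, 4, 6]), ([9, 1, 4], [0, 3, 5]),
   ([0, 1, 5], [2, 4, 7]), ([1, 2, 6], [3, 5, 8]), ([2, 3, 7], [4, 6, 9]),
   ([3, 4, 8], [5, 7, 0]), ([4, 5, 9], [6, 8, 1]), ([5, 6, 0], [7, 9, 2]),
   ([6, 7, 1], [8, 0, 3])]

-- A's 'for s in LINE1_SETS' loop with its early returns, as structural recursion
def getTargetLoop (d1 d2 : Int) : List (PySem.Set Int × PySem.Set Int) → Option (List Int)
  | [] => none
  | s :: rest =>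
    if PySem.Set.contains s.1 d1 && PySem.Set.contains s.1 d2 then some s.2
    else if PySem.Set.contains s.2 d1 && PySem.Set.contains s.2 d2 then some s.1
    else getTargetLoop d1 d2 rest

def get_target (jodi_str : String) : Option (List Int) :=
  -- str(jodi_str) is the identity on a str argument
  if PySem.Str.strIsdigit jodi_str = false ∨ PySem.Str.len jodi_str < 2 then none
  else
    -- int(jodi_str[k]): the guard makes the index and the parse succeed; .getD 0 is unreachable
    let d1 : Int := ((PySem.Str.pyGet? jodi_str 0).bind (fun c => PySem.Int.ofChars? [c])).getD 0
    let d2 : Int := ((PySem.Str.pyGet? jodi_str 1).bind (fun c => PySem.Int.ofChars? [c])).getD 0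
    getTargetLoop d1 d2 LINE1_SETS

-- ===== PORT B =====
-- _ROWS: each (t, tg) row as a pair of tuples (lists)
def ROWS_B : List (List Int × List Int) :=
  [([7, 1, 2], [0, 5, 9]), ([8, 1, 3], [0, 4, 6]), ([9, 1, 4], [0, 3, 5]),
   ([0, 1, 5], [2, 4, 7]), ([1, 2, 6], [3, 5, 8]), ([2, 3, 7], [4, 6, 9]),
   ([3, 4, 8], [5, 7, 0]), ([4, 5, 9], [6, 8, 1]), ([5, 6, 0], [7, 9, 2]),
   ([6, 7, 1], [8, 0, 3])]

-- _T_IDX / _TG_IDX: the two dict comprehensions over range(10) with their set comprehensions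
def tIdx : PySem.Dict Int (PySem.Set Int) :=
  PySem.Dict.ofList ((PySem.List.pyRange 0 10 1).map (fun d =>
    (d, PySem.Set.ofList
      (((PySem.List.enumerate ROWS_B 0).filter (fun p => p.2.1.contains d)).map (·.1)))))

def tgIdx : PySem.Dict Int (PySem.Set Int) :=
  PySem.Dict.ofList ((PySem.List.pyRange 0 10 1).map (fun d =>
    (d, PySem.Set.ofList
      (((PySem.List.enumerate ROWS_B 0).filter (fun p => p.2.2.contains d)).map (·.1)))))

-- _pick(d1, d2); the dict lookups _T_IDX[d1] cannot raise (after the digit guard the keys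
-- are 0..9, all present), so getD's default is unreachable, as is min?'s on a nonempty set
def pick (d1 d2 : Int) : Option (List Int) :=
  let tHits := PySem.Set.inter (tIdx.getD d1 []) (tIdx.getD d2 [])
  let tgHits := PySem.Set.inter (tgIdx.getD d1 []) (tgIdx.getD d2 [])
  let best : Option (Int × Int) :=
    if tHits.isEmpty then none
    else some ((PySem.List.min? tHits (fun x => x)).getD 0, 1)
  let best : Option (Int × Int) :=
    if tgHits.isEmpty then best
    else
      let j := (PySem.List.min? tgHits (fun x => x)).getD 0
      match best with
      | none => some (j, 0)
      | some b => if j < b.1 then some (j, 0) else some b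
  match best with
  | none => none
  | some (i, side) =>
    let row := PySem.List.pyGetD ROWS_B i ([], [])
    some (PySem.Set.ofList (if side == 1 then row.2 else row.1))

def get_target_alt (jodi_str : String) : Option (List Int) :=
  if PySem.Str.strIsdigit jodi_str = false ∨ PySem.Str.len jodi_str < 2 then none
  else
    pick (((PySem.Str.pyGet? jodi_str 0).bind (fun c => PySem.Int.ofChars? [c])).getD 0)
         (((PySem.Str.pyGet? jodi_str 1).bind (fun c => PySem.Int.ofChars? [c])).getD 0)

-- ===== PRECONDITION & SPEC =====
def Spec_get_target (jodi_str : String) (out : Option (List Int)) : Prop := out = get_target_alt jodi_str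
instance (jodi_str : String) (out : Option (List Int)) : Decidable (Spec_get_target jodi_str out) := by unfold Spec_get_target; infer_instance

-- ===== CLAIM (what is proved, stated in full; the proofs are below) =====
def Claim_equal_get_target : Prop := ∀ (jodi_str : String), Dom_get_target jodi_str → Spec_get_target jodi_str (get_target jodi_str)

-- ===== LEMMAS AND PROOFS =====

-- a char accepted by isdigit is one of the ten ASCII digits
lemma digit_mem (c : Char) (h : PySem.Chars.isdigit c = true) :
    c ∈ ['0', '1', '2', '3', '4', '5', '6', '7', '8', '9'] := by
  simp only [PySem.Chars.isdigit, Bool.and_eq_true, decide_eq_true_eq, Char.le_def,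
    UInt32.le_iff_toNat_le] at h
  have hb : 48 ≤ c.toNat ∧ c.toNat ≤ 57 := by simpa using h
  have key : ∀ (d : Char), c.toNat = d.toNat → c = d :=
    fun d hd => Char.ext (UInt32.toNat_inj.mp hd)
  have h10 : c.toNat = 48 ∨ c.toNat = 49 ∨ c.toNat = 50 ∨ c.toNat = 51 ∨ c.toNat = 52 ∨
      c.toNat = 53 ∨ c.toNat = 54 ∨ c.toNat = 55 ∨ c.toNat = 56 ∨ c.toNat = 57 := by omega
  rcases h10 with h | h | h | h | h | h | h | h | h | h
  · simp [key '0' (by rw [h]; decide)]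
  · simp [key '1' (by rw [h]; decide)]
  · simp [key '2' (by rw [h]; decide)]
  · simp [key '3' (by rw [h]; decide)]
  · simp [key '4' (by rw [h]; decide)]
  · simp [key '5' (by rw [h]; decide)]
  · simp [key '6' (by rw [h]; decide)]
  · simp [key '7' (by rw [h]; decide)]
  · simp [key '8' (by rw [h]; decide)]
  · simp [key '9' (by rw [h]; decide)]

-- int('<digit char>') parses to its value, which lies in 0..9
lemma ofChars_digit (c : Char) (h : PySem.Chars.isdigit c = true) :
    ∃ k : Int, PySem.Int.ofChars? [c] = some k ∧ 0 ≤ k ∧ k < 10 := by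
  have hm := digit_mem c h
  fin_cases hm
  exacts [⟨0, by decide, by decide, by decide⟩, ⟨1, by decide, by decide, by decide⟩,
    ⟨2, by decide, by decide, by decide⟩, ⟨3, by decide, by decide, by decide⟩,
    ⟨4, by decide, by decide, by decide⟩, ⟨5, by decide, by decide, by decide⟩,
    ⟨6, by decide, by decide, by decide⟩, ⟨7, by decide, by decide, by decide⟩,
    ⟨8, by decide, by decide, by decide⟩, ⟨9, by decide, by decide, by decide⟩]

-- the two cores agree on every digit pair
lemma core_eq (d1 d2 : Int) (h1 : 0 ≤ d1) (h1' : d1 < 10) (h2 : 0 ≤ d2) (h2' : d2 < 10) :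
    getTargetLoop d1 d2 LINE1_SETS = pick d1 d2 := by
  interval_cases d1 <;> interval_cases d2 <;> decide

-- ===== VERDICT (by name: the statement is the Claim_ definition above) =====
theorem get_target_spec : Claim_equal_get_target := by
  intro s _
  unfold Spec_get_target get_target get_target_alt
  by_cases hg : PySem.Str.strIsdigit s = false ∨ PySem.Str.len s < 2
  · rw [if_pos hg, if_pos hg]
  · rw [if_neg hg, if_neg hg]
    rcases not_or.mp hg with ⟨hd, hl⟩
    have hdig : PySem.Str.strIsdigit s = true := by simpa using hd
    have hlen : 2 ≤ PySem.Str.len s := by omega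
    have hdig' : PySem.Chars.strIsdigit s.toList = true := by
      rw [← PySem.Str.strIsdigit_eq]
      exact hdig
    have hlen' : 2 ≤ s.toList.length := by
      have := PySem.Str.len_eq s
      omega
    obtain ⟨c0, c1, t, hlist⟩ : ∃ c0 c1 t, s.toList = c0 :: c1 :: t := by
      match hh : s.toList with
      | [] => rw [hh] at hlen'; simp at hlen'
      | [c] => rw [hh] at hlen'; simp at hlen'
      | c0 :: c1 :: t => exact ⟨c0, c1, t, rfl⟩
    have hall : PySem.Chars.isdigit c0 = true ∧ PySem.Chars.isdigit c1 = true := by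
      simp only [PySem.Chars.strIsdigit, hlist, Bool.and_eq_true, List.all_cons] at hdig'
      exact ⟨hdig'.2.1, hdig'.2.2.1⟩
    have hg0 : PySem.Str.pyGet? s 0 = some c0 := by
      simp [hlist, PySem.List.pyGet?, PySem.List.pyIdx?,
        show (0 : Int) ≤ (t.length : Int) + 1 from by positivity]
    have hg1 : PySem.Str.pyGet? s 1 = some c1 := by
      simp [hlist, PySem.List.pyGet?, PySem.List.pyIdx?]
    obtain ⟨k1, hk1, hk1a, hk1b⟩ := ofChars_digit c0 hall.1
    obtain ⟨k2, hk2, hk2a, hk2b⟩ := ofChars_digit c1 hall.2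
    rw [hg0, hg1]
    simp only [Option.bind_some, hk1, hk2, Option.getD_some]
    exact core_eq k1 k2 hk1a hk1b hk2a hk2b
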